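-- pv_equiv track=rewrite | github.com/minghaoguo81/Data-Structure-and-Algorithm-Class-Solutions | Algorithms on Graphs/Week 4/Shortest_path.py | bfs
-- ===== SOURCE A (Python) =====
-- import queue
--
-- def bfs(adj, s, n):
--     dist = [None for i in range(n)]
--     dist[s] = 0
--     q = queue.Queue(maxsize=n)
--     q.put(s)
--     while not q.empty():
--         u = q.get()
--         for v in adj[u]:
--             if dist[v] is None:
--                 q.put(v)
--                 dist[v] = dist[u] + 1
--     reach = [1 if dist[i] is not None else 0 for i in range(n)]
--     return reach
-- ===== SOURCE B (Python) =====
-- def bfs(adj, s, n):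
--     reach = [0] * n
--     reach[s] = 1
--     frontier = [s]
--     while frontier:
--         nxt = []
--         for u in frontier:
--             for v in adj[u]:
--                 if not reach[v]:
--                     reach[v] = 1
--                     nxt.append(v)
--         frontier = nxt
--     return reach
-- ===== Notes on version B (the rewrite author's own statement) =====
-- stated objective: simpler
-- what changed: Replaces the queue-module FIFO BFS with per-node distance bookkeeping by a level-synchronous frontier BFS: a plain 0/1 mask list, each round scanning the whole current frontier and collecting the next frontier, returning the mask directly.
-- outside the precondition, e.g. on bfs([[-1, 1]], 0, 2): A returns [1, 1], B returns [1, 1]; on bfs([[0, -2]], 0, 2): A returns [1, 0], B returns [1, 0]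
import Mathlib
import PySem

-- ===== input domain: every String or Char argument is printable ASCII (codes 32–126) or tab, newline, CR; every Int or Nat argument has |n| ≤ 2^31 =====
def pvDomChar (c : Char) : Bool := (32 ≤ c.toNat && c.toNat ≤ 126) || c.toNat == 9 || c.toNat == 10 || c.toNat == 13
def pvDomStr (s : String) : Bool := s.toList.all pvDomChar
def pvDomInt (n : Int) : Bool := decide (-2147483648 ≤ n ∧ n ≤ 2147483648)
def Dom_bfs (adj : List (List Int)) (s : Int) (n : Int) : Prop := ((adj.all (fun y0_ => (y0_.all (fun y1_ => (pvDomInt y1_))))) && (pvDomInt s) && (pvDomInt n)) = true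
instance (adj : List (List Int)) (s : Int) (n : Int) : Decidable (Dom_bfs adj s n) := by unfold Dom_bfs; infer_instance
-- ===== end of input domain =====

-- B replaces A's queue-module FIFO BFS with distance bookkeeping by a level-synchronous
-- frontier BFS over a plain 0/1 mask (only the reachability mask is returned);
-- objective: simpler, same asymptotic cost.

-- ===== PORT A =====
-- adj[u] (Python indexing; IndexError excluded by Pre_bfs, modelled as [])
def rowOf (adj : List (List Int)) (u : Int) : List Int := (PySem.List.pyGet? adj u).getD []
-- dist[i] read (in range under Pre_bfs; out of range modelled as None)
def distAt (dist : List (Option Int)) (i : Int) : Option Int := (PySem.List.pyGet? dist i).getD none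
-- the inner 'for v in adj[u]' loop: mark dist[v] = dist[u] + 1 and collect the q.put(v)'s in order
-- (dist[u] is re-read each step, as Python does; its .getD 0 is unreachable under Pre_bfs since u is marked)
def aInner (dist : List (Option Int)) (u : Int) : List Int → List (Option Int) × List Int
  | [] => (dist, [])
  | v :: vs =>
    if distAt dist v = none then
      let dist' := PySem.List.pySetD dist v (some ((distAt dist u).getD 0 + 1))
      let r := aInner dist' u vs
      (r.1, v :: r.2)
    else aInner dist u vs
-- the 'while not q.empty()' loop; q is a FIFO: get from the head, put at the tail.
-- fuel n+1 bounds the number of iterations (each put marks a fresh vertex, so ≤ n puts, ≤ n+1 gets);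
-- sufficiency is proved under Pre_bfs in the lemmas below.
def aLoop (adj : List (List Int)) : Nat → List (Option Int) → List Int → List (Option Int)
  | 0, dist, _ => dist
  | _ + 1, dist, [] => dist
  | f + 1, dist, u :: qs =>
    let p := aInner dist u (rowOf adj u)
    aLoop adj f p.1 (qs ++ p.2)

def bfs (adj : List (List Int)) (s : Int) (n : Int) : List Int :=
  let dist0 : List (Option Int) := List.replicate n.toNat none   -- [None for i in range(n)]
  let dist1 := PySem.List.pySetD dist0 s (some 0)                 -- dist[s] = 0
  let fin := aLoop adj (n.toNat + 1) dist1 [s]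
  (List.range n.toNat).map (fun (i : ℕ) => if (distAt fin (i : Int)).isSome then (1 : Int) else 0)

-- ===== PORT B =====
-- reach[v] read: a 0/1 Int entry ('if not reach[v]' tests it against 0)
def reachVal (r : List Int) (v : Int) : Int := (PySem.List.pyGet? r v).getD 0
-- adj[u] for port B
def bAdjRow (adj : List (List Int)) (u : Int) : List Int := (PySem.List.pyGet? adj u).getD []
-- 'for v in adj[u]': mark unreached neighbours and append them to the next frontier nxt
def bVisit (r : List Int) (nxt : List Int) : List Int → List Int × List Int
  | [] => (r, nxt)
  | v :: vs =>
    if reachVal r v == 0 then bVisit (PySem.List.pySetD r v 1) (nxt ++ [v]) vs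
    else bVisit r nxt vs
-- 'for u in frontier': scan the whole current frontier, threading reach and nxt
def bFront (adj : List (List Int)) (r : List Int) (nxt : List Int) : List Int → List Int × List Int
  | [] => (r, nxt)
  | u :: us =>
    let p := bVisit r nxt (bAdjRow adj u)
    bFront adj p.1 p.2 us
-- 'while frontier': one recursive step per BFS level; fuel n+1 bounds the number of levels
-- (each nonempty level marks at least the vertices of the next frontier, proved below)
def bRounds (adj : List (List Int)) : Nat → List Int → List Int → List Int
  | 0, r, _ => r
  | _ + 1, r, [] => r
  | f + 1, r, front =>
    let p := bFront adj r [] front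
    bRounds adj f p.1 p.2

def bfs_alt (adj : List (List Int)) (s : Int) (n : Int) : List Int :=
  bRounds adj (n.toNat + 1) (PySem.List.pySetD (List.replicate n.toNat 0) s 1) [s]

-- ===== PRECONDITION & SPEC =====
-- Pre_bfs excludes the inputs on which A raises IndexError: it requires every vertex in the
-- reachable closure of s to index both dist (length n) and adj in range (Python semantics,
-- negative indices allowed).  This is slightly conservative: it also excludes some returning
-- inputs whose out-of-range aliased indices A happens never to dereference (its dist cell being
-- already marked); on those A and B agree, as the cites show.
-- (reachSet is the saturation of {s} under the successor map — a property of the input graph,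
-- not a copy of either port's worklist loop.)
def rowOfP (adj : List (List Int)) (u : Int) : List Int := (PySem.List.pyGet? adj u).getD []
def goodV (adj : List (List Int)) (n u : Int) : Bool :=
  decide (-n ≤ u ∧ u < n ∧ -(adj.length : Int) ≤ u ∧ u < (adj.length : Int))
def reachExpand (adj : List (List Int)) (n : Int) (S : List Int) : List Int :=
  PySem.Set.update S (S.flatMap (fun u => if goodV adj n u then rowOfP adj u else []))
def reachIter (adj : List (List Int)) (n : Int) : Nat → List Int → List Int
  | 0, S => S
  | k + 1, S => reachIter adj n k (reachExpand adj n S)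
def reachSet (adj : List (List Int)) (s : Int) (n : Int) : List Int :=
  reachIter adj n ((adj.flatMap (fun r => r)).length + 1) [s]
def Pre_bfs (adj : List (List Int)) (s : Int) (n : Int) : Prop :=
  goodV adj n s = true ∧ ∀ u ∈ reachSet adj s n, goodV adj n u = true
instance (adj : List (List Int)) (s : Int) (n : Int) : Decidable (Pre_bfs adj s n) := by
  unfold Pre_bfs; infer_instance
def pvWitness_bfs : List (List Int) × Int × Int := ([[1], [0, 2], []], 0, 3)

def Spec_bfs (adj : List (List Int)) (s : Int) (n : Int) (out : List Int) : Prop := out = bfs_alt adj s n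
instance (adj : List (List Int)) (s : Int) (n : Int) (out : List Int) : Decidable (Spec_bfs adj s n out) := by unfold Spec_bfs; infer_instance

-- ===== CLAIM (what is proved, stated in full; the proofs are below) =====
def Claim_equal_bfs : Prop := ∀ (adj : List (List Int)) (s : Int) (n : Int), Dom_bfs adj s n → Pre_bfs adj s n → Spec_bfs adj s n (bfs adj s n)

-- ===== LEMMAS AND PROOFS =====

-- the dist cell a Python index u refers to (negative = from the end)
def canV (n v : Int) : Int := if v < 0 then v + n else v

theorem rowOfP_eq (adj : List (List Int)) (u : Int) : rowOfP adj u = rowOf adj u := rfl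

theorem bAdjRow_eq (adj : List (List Int)) (u : Int) : bAdjRow adj u = rowOf adj u := rfl

-- ---- saturation facts about reachSet (used to derive the row bounds from Pre_bfs) ----

theorem nodup_length_le (S L : List Int) (h : S.Nodup) (hsub : ∀ x ∈ S, x ∈ L) :
    S.length ≤ L.length := by
  classical
  have h1 : S.toFinset.card = S.length := List.toFinset_card_of_nodup h
  have h2 : S.toFinset ⊆ L.toFinset := by
    intro x hx
    rw [List.mem_toFinset] at hx ⊢
    exact hsub x hx
  have h3 := Finset.card_le_card h2
  have h4 := L.toFinset_card_le
  omega

theorem reachExpand_append (adj : List (List Int)) (n : Int) (S : List Int) :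
    ∃ T, reachExpand adj n S = S ++ T ∧ ∀ x ∈ T, x ∈ adj.flatMap (fun r => r) := by
  refine ⟨_, PySem.Set.update_eq_append_filter .., ?_⟩
  intro x hx
  have hx' : x ∈ S.flatMap (fun u => if goodV adj n u then rowOfP adj u else []) := by
    have := List.mem_filter.1 hx
    exact (PySem.Set.mem_ofList ..).1 this.1
  rcases List.mem_flatMap.1 hx' with ⟨u, _, hxu⟩
  by_cases hg : goodV adj n u = true
  · rw [if_pos hg] at hxu
    unfold rowOfP at hxu
    cases hrow : PySem.List.pyGet? adj u with
    | none => rw [hrow] at hxu; simp at hxu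
    | some row =>
      rw [hrow] at hxu
      exact List.mem_flatMap.2 ⟨row, PySem.List.mem_of_pyGet?_eq_some adj hrow, hxu⟩
  · rw [if_neg hg] at hxu; simp at hxu

theorem reachExpand_mem (adj : List (List Int)) (n : Int) (S : List Int) (x : Int) :
    x ∈ reachExpand adj n S ↔
      x ∈ S ∨ x ∈ S.flatMap (fun u => if goodV adj n u then rowOfP adj u else []) :=
  PySem.Set.mem_update ..

theorem reachExpand_nodup (adj : List (List Int)) (n : Int) (S : List Int) (h : S.Nodup) :
    (reachExpand adj n S).Nodup := by
  unfold reachExpand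
  exact PySem.Set.nodup_update _ _ h

theorem reachIter_mono (adj : List (List Int)) (n : Int) :
    ∀ (k : Nat) (S : List Int) (x : Int), x ∈ S → x ∈ reachIter adj n k S := by
  intro k
  induction k with
  | zero => intro S x hx; exact hx
  | succ j ih =>
    intro S x hx
    exact ih _ _ ((reachExpand_mem adj n S x).2 (Or.inl hx))

theorem reachIter_sub (adj : List (List Int)) (n : Int) :
    ∀ (k : Nat) (S : List Int) (x : Int), x ∈ reachIter adj n k S →
      x ∈ S ∨ x ∈ adj.flatMap (fun r => r) := by
  intro k
  induction k with
  | zero => intro S x hx; exact Or.inl hx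
  | succ j ih =>
    intro S x hx
    rcases ih (reachExpand adj n S) x hx with h | h
    · rcases reachExpand_append adj n S with ⟨T, hT, hTm⟩
      rw [hT] at h
      rcases List.mem_append.1 h with h' | h'
      · exact Or.inl h'
      · exact Or.inr (hTm x h')
    · exact Or.inr h

theorem reachIter_nodup (adj : List (List Int)) (n : Int) :
    ∀ (k : Nat) (S : List Int), S.Nodup → (reachIter adj n k S).Nodup := by
  intro k
  induction k with
  | zero => intro S h; exact h
  | succ j ih => intro S h; exact ih _ (reachExpand_nodup adj n S h)

theorem reachIter_fix (adj : List (List Int)) (n : Int) (S : List Int)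
    (h : reachExpand adj n S = S) : ∀ k, reachIter adj n k S = S := by
  intro k
  induction k with
  | zero => rfl
  | succ j ih =>
    show reachIter adj n j (reachExpand adj n S) = S
    rw [h]
    exact ih

theorem sat_or_grow (adj : List (List Int)) (n : Int) :
    ∀ (k : Nat) (S : List Int),
      reachExpand adj n (reachIter adj n k S) = reachIter adj n k S ∨
        (reachIter adj n k S).length ≥ k + S.length := by
  intro k
  induction k with
  | zero => exact fun S => Or.inr (by simp [reachIter])
  | succ j ih =>
    intro S
    by_cases hF : reachExpand adj n S = S
    · left
      have hfix : ∀ m, reachIter adj n m S = S := reachIter_fix adj n S hF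
      rw [hfix (j + 1)]
      exact hF
    · rcases ih (reachExpand adj n S) with h | h
      · exact Or.inl h
      · right
        rcases reachExpand_append adj n S with ⟨T, hT, _⟩
        have hTne : T ≠ [] := by
          intro hTe
          rw [hTe, List.append_nil] at hT
          exact hF hT
        have hlen : (reachExpand adj n S).length ≥ S.length + 1 := by
          rw [hT, List.length_append]
          have : 0 < T.length := List.length_pos_iff.2 hTne
          omega
        show (reachIter adj n j (reachExpand adj n S)).length ≥ _
        omega

theorem reachSet_fixed (adj : List (List Int)) (s : Int) (n : Int) :
    reachExpand adj n (reachSet adj s n) = reachSet adj s n := by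
  rcases sat_or_grow adj n ((adj.flatMap (fun r => r)).length + 1) [s] with h | h
  · exact h
  · exfalso
    have hnd : (reachSet adj s n).Nodup :=
      reachIter_nodup adj n _ [s] (by simp)
    have hsub : ∀ x ∈ reachSet adj s n, x ∈ s :: adj.flatMap (fun r => r) := by
      intro x hx
      rcases reachIter_sub adj n _ [s] x hx with h' | h'
      · simp at h'; simp [h']
      · exact List.mem_cons_of_mem _ h'
    have hle := nodup_length_le _ _ hnd hsub
    have h2 : (reachSet adj s n).length ≥ (adj.flatMap (fun r => r)).length + 2 := by
      show (reachIter adj n ((adj.flatMap (fun r => r)).length + 1) [s]).length ≥ _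
      have hone : ([s] : List Int).length = 1 := rfl
      omega
    have hle2 : (reachSet adj s n).length ≤ (adj.flatMap (fun r => r)).length + 1 := by
      simpa using hle
    omega

theorem mem_reachSet_self (adj : List (List Int)) (s : Int) (n : Int) :
    s ∈ reachSet adj s n :=
  reachIter_mono adj n _ [s] s (by simp)

theorem mem_reachSet_step (adj : List (List Int)) (s n u v : Int)
    (hu : u ∈ reachSet adj s n) (hg : goodV adj n u = true) (hv : v ∈ rowOfP adj u) :
    v ∈ reachSet adj s n := by
  rw [← reachSet_fixed adj s n]
  refine (reachExpand_mem ..).2 (Or.inr ?_)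
  exact List.mem_flatMap.2 ⟨u, hu, by rw [if_pos hg]; exact hv⟩

-- reachability from s along adj rows (raw Python indices, as the algorithms traverse them)
inductive Reach (adj : List (List Int)) (s : Int) : Int → Prop
  | refl : Reach adj s s
  | step {u v : Int} : Reach adj s u → v ∈ rowOf adj u → Reach adj s v

theorem canV_bounds (n v : Int) (h1 : -n ≤ v) (h2 : v < n) :
    0 ≤ canV n v ∧ canV n v < n := by
  unfold canV
  split_ifs <;> omega

-- generic worklist exploration over an abstract mark function on dist cells
def gUpd (M : Int → Bool) (v : Int) : Int → Bool := fun x => if x = v then true else M x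
def gInner (n : Int) (M : Int → Bool) : List Int → (Int → Bool) × List Int
  | [] => (M, [])
  | v :: vs =>
    if M (canV n v) then gInner n M vs
    else
      let r := gInner n (gUpd M (canV n v)) vs
      (r.1, v :: r.2)
-- A's schedule: a FIFO queue, one node per step, pushes appended at the end
def gLoop (adj : List (List Int)) (n : Int) :
    Nat → (Int → Bool) → List Int → (Int → Bool)
  | 0, M, _ => M
  | _ + 1, M, [] => M
  | f + 1, M, u :: qs =>
    let p := gInner n M (rowOf adj u)
    gLoop adj n f p.1 (qs ++ p.2)
-- B's schedule: whole levels, all of W processed in one step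
def gFront (adj : List (List Int)) (n : Int) (M : Int → Bool) :
    List Int → (Int → Bool) × List Int
  | [] => (M, [])
  | u :: us =>
    let p := gInner n M (rowOf adj u)
    let q := gFront adj n p.1 us
    (q.1, p.2 ++ q.2)
def gRounds (adj : List (List Int)) (n : Int) :
    Nat → (Int → Bool) → List Int → (Int → Bool)
  | 0, M, _ => M
  | _ + 1, M, [] => M
  | f + 1, M, front =>
    let p := gFront adj n M front
    gRounds adj n f p.1 p.2

theorem gInner_cons_true (n : Int) {M : Int → Bool} {v : Int} (vs : List Int)
    (h : M (canV n v) = true) : gInner n M (v :: vs) = gInner n M vs := by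
  simp [gInner, h]

theorem gInner_cons_false (n : Int) {M : Int → Bool} {v : Int} (vs : List Int)
    (h : M (canV n v) = false) :
    gInner n M (v :: vs) =
      ((gInner n (gUpd M (canV n v)) vs).1, v :: (gInner n (gUpd M (canV n v)) vs).2) := by
  simp [gInner, h]

theorem gInner_mark (n : Int) (row : List Int) (M : Int → Bool) (x : Int) :
    (gInner n M row).1 x = true ↔ M x = true ∨ x ∈ (gInner n M row).2.map (canV n) := by
  induction row generalizing M with
  | nil => simp [gInner]
  | cons v vs ih =>
    cases h : M (canV n v) with
    | true =>
      rw [gInner_cons_true n vs h]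
      exact ih M
    | false =>
      rw [gInner_cons_false n vs h]
      simp only [List.map_cons, List.mem_cons]
      rw [ih]
      constructor
      · rintro (h1 | h2)
        · by_cases hx : x = canV n v
          · exact Or.inr (Or.inl hx)
          · simp [gUpd, hx] at h1; exact Or.inl h1
        · exact Or.inr (Or.inr h2)
      · rintro (h1 | h2 | h3)
        · exact Or.inl (by simp [gUpd, h1])
        · exact Or.inl (by simp [gUpd, h2])
        · exact Or.inr h3

theorem gInner_push (n : Int) (row : List Int) (M : Int → Bool) :
    ∀ v ∈ (gInner n M row).2, v ∈ row ∧ M (canV n v) = false := by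
  induction row generalizing M with
  | nil => simp [gInner]
  | cons w ws ih =>
    cases h : M (canV n w) with
    | true =>
      rw [gInner_cons_true n ws h]
      intro v hv
      rcases ih M v hv with ⟨h1, h2⟩
      exact ⟨List.mem_cons_of_mem _ h1, h2⟩
    | false =>
      rw [gInner_cons_false n ws h]
      intro v hv
      rcases List.mem_cons.1 hv with rfl | hv'
      · exact ⟨List.mem_cons_self, h⟩
      · rcases ih (gUpd M (canV n w)) v hv' with ⟨h1, h2⟩
        refine ⟨List.mem_cons_of_mem _ h1, ?_⟩
        by_cases hvw : canV n v = canV n w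
        · simp [gUpd, hvw] at h2
        · simpa [gUpd, hvw] using h2

theorem gInner_nodup (n : Int) (row : List Int) (M : Int → Bool) :
    ((gInner n M row).2.map (canV n)).Nodup := by
  induction row generalizing M with
  | nil => simp [gInner]
  | cons v vs ih =>
    cases h : M (canV n v) with
    | true => rw [gInner_cons_true n vs h]; exact ih M
    | false =>
      rw [gInner_cons_false n vs h]
      simp only [List.map_cons]
      refine List.nodup_cons.2 ⟨?_, ih (gUpd M (canV n v))⟩
      intro hmem
      rcases List.mem_map.1 hmem with ⟨w, hw, heq⟩
      have h2 := (gInner_push n vs (gUpd M (canV n v)) w hw).2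
      rw [heq] at h2
      simp [gUpd] at h2

-- unmarked dist cells, for the fuel argument
def unmk (M : Int → Bool) (n : Int) : Finset ℕ :=
  (Finset.range n.toNat).filter (fun k => M (k : Int) = false)

theorem unmk_step (n : Int) (row : List Int) (M : Int → Bool)
    (hrow : ∀ v ∈ row, -n ≤ v ∧ v < n) :
    (unmk (gInner n M row).1 n).card + (gInner n M row).2.length = (unmk M n).card := by
  classical
  set Pc := (gInner n M row).2.map (canV n) with hPc
  have hPmem : ∀ c ∈ Pc, 0 ≤ c ∧ c < n ∧ M c = false := by
    intro c hc
    rcases List.mem_map.1 hc with ⟨v, hvP, rfl⟩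
    rcases gInner_push n row M v hvP with ⟨h1, h2⟩
    have hb := canV_bounds n v (hrow v h1).1 (hrow v h1).2
    exact ⟨hb.1, hb.2, h2⟩
  have hnodupN : (Pc.map Int.toNat).Nodup := by
    refine (List.Nodup.map_on ?_ (gInner_nodup n row M))
    intro x hx y hy hxy
    have hx0 := (hPmem x hx).1
    have hy0 := (hPmem y hy).1
    omega
  have hset : unmk (gInner n M row).1 n = unmk M n \ (Pc.map Int.toNat).toFinset := by
    ext k
    simp only [unmk, Finset.mem_sdiff, Finset.mem_filter, Finset.mem_range,
      List.mem_toFinset, List.mem_map]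
    constructor
    · intro ⟨hk, hMk⟩
      have : ¬ (M (k : Int) = true ∨ (k : Int) ∈ Pc) := by
        rw [hPc, ← gInner_mark]; simp [hMk]
      push_neg at this
      refine ⟨⟨hk, by simpa using this.1⟩, ?_⟩
      rintro ⟨c, hcP, rfl⟩
      have hc0 := (hPmem c hcP).1
      have hcast : ((c.toNat : ℕ) : Int) = c := by omega
      exact this.2 (by rwa [hcast])
    · intro ⟨⟨hk, hMk⟩, hnP⟩
      refine ⟨hk, ?_⟩
      have : ¬ (M (k : Int) = true ∨ (k : Int) ∈ Pc) := by
        rintro (h | h)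
        · simp [h] at hMk
        · exact hnP ⟨(k : Int), h, by simp⟩
      rw [hPc, ← gInner_mark] at this
      simpa using this
  have hsub : (Pc.map Int.toNat).toFinset ⊆ unmk M n := by
    intro k hk
    simp only [List.mem_toFinset, List.mem_map] at hk
    rcases hk with ⟨c, hcP, rfl⟩
    rcases hPmem c hcP with ⟨h0, h1, h2⟩
    simp only [unmk, Finset.mem_filter, Finset.mem_range]
    constructor
    · omega
    · have : ((c.toNat : ℕ) : Int) = c := by omega
      rw [this]; exact h2
  have hcard : (Pc.map Int.toNat).toFinset.card = (gInner n M row).2.length := by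
    rw [List.toFinset_card_of_nodup hnodupN, List.length_map, hPc, List.length_map]
  rw [hset, ← hcard]
  exact Finset.card_sdiff_add_card_eq_card hsub

-- ---- level-step facts about gFront (B's schedule) ----

theorem gFront_push (adj : List (List Int)) (n : Int) (front : List Int) (M : Int → Bool) :
    ∀ v ∈ (gFront adj n M front).2,
      (∃ u ∈ front, v ∈ rowOf adj u) ∧ M (canV n v) = false := by
  induction front generalizing M with
  | nil => simp [gFront]
  | cons u us ih =>
    intro v hv
    simp only [gFront, List.mem_append] at hv
    rcases hv with h | h
    · rcases gInner_push n (rowOf adj u) M v h with ⟨h1, h2⟩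
      exact ⟨⟨u, List.mem_cons_self, h1⟩, h2⟩
    · rcases ih (gInner n M (rowOf adj u)).1 v h with ⟨⟨w, hw1, hw2⟩, h2⟩
      refine ⟨⟨w, List.mem_cons_of_mem _ hw1, hw2⟩, ?_⟩
      cases hM : M (canV n v) with
      | false => rfl
      | true =>
        have := (gInner_mark n (rowOf adj u) M (canV n v)).2 (Or.inl hM)
        rw [this] at h2
        exact h2

-- ---- the two schedules compute the same marks: a whole level is a run of queue steps ----

-- processing the prefix W1 of the queue is exactly one gFront pass over W1
theorem gLoop_front (adj : List (List Int)) (n : Int) :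
    ∀ (W1 W2 : List Int) (M : Int → Bool) (f : Nat),
      gLoop adj n (W1.length + f) M (W1 ++ W2) =
        gLoop adj n f (gFront adj n M W1).1 (W2 ++ (gFront adj n M W1).2) := by
  intro W1
  induction W1 with
  | nil => intro W2 M f; simp [gFront]
  | cons u us ih =>
    intro W2 M f
    have hfu : (u :: us).length + f = (us.length + f) + 1 := by simp; omega
    rw [hfu]
    show gLoop adj n ((us.length + f) + 1) M (u :: (us ++ W2)) = _
    simp only [gLoop, gFront]
    rw [List.append_assoc, ih (W2 ++ (gInner n M (rowOf adj u)).2), List.append_assoc]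

-- once the fuel covers the worklist plus the unmarked cells, one more unit changes nothing
theorem gLoop_fuel_succ (adj : List (List Int)) (s n : Int)
    (Hrows : ∀ u : Int, Reach adj s u → ∀ v ∈ rowOf adj u, -n ≤ v ∧ v < n) :
    ∀ (f : Nat) (M : Int → Bool) (W : List Int),
      (∀ u ∈ W, Reach adj s u) → W.length + (unmk M n).card ≤ f →
      gLoop adj n (f + 1) M W = gLoop adj n f M W := by
  intro f
  induction f with
  | zero =>
    intro M W _ hb
    have hW : W = [] := by
      cases W with
      | nil => rfl
      | cons a l => simp at hb
    subst hW
    simp [gLoop]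
  | succ f ih =>
    intro M W hWR hb
    cases W with
    | nil => simp [gLoop]
    | cons u qs =>
      show gLoop adj n (f + 1 + 1) M (u :: qs) = gLoop adj n (f + 1) M (u :: qs)
      simp only [gLoop]
      have hRu : Reach adj s u := hWR u List.mem_cons_self
      have hcnt := unmk_step n (rowOf adj u) M (Hrows u hRu)
      apply ih
      · intro x hx
        rcases List.mem_append.1 hx with h | h
        · exact hWR x (List.mem_cons_of_mem _ h)
        · exact Reach.step hRu (gInner_push n _ M x h).1
      · rw [List.length_append]
        simp only [List.length_cons] at hb
        omega

theorem gLoop_fuel_ge (adj : List (List Int)) (s n : Int)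
    (Hrows : ∀ u : Int, Reach adj s u → ∀ v ∈ rowOf adj u, -n ≤ v ∧ v < n)
    (f : Nat) (M : Int → Bool) (W : List Int)
    (hWR : ∀ u ∈ W, Reach adj s u) (hb : W.length + (unmk M n).card ≤ f) :
    ∀ d, gLoop adj n (f + d) M W = gLoop adj n f M W := by
  intro d
  induction d with
  | zero => rfl
  | succ e ihe =>
    have h1 : f + (e + 1) = (f + e) + 1 := by omega
    rw [h1, gLoop_fuel_succ adj s n Hrows (f + e) M W hWR (by omega), ihe]

-- the level-synchronous run is a queue run with at least as much fuel
theorem gRounds_as_gLoop (adj : List (List Int)) (s n : Int) :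
    ∀ (k : Nat) (M : Int → Bool) (W : List Int), (∀ u ∈ W, Reach adj s u) →
      ∃ t, k ≤ t ∧ gRounds adj n k M W = gLoop adj n t M W := by
  intro k
  induction k with
  | zero => intro M W _; exact ⟨0, le_refl _, rfl⟩
  | succ k ih =>
    intro M W hWR
    cases W with
    | nil => exact ⟨k + 1, le_refl _, by simp [gRounds, gLoop]⟩
    | cons u us =>
      have hWR' : ∀ x ∈ (gFront adj n M (u :: us)).2, Reach adj s x := by
        intro x hx
        rcases gFront_push adj n (u :: us) M x hx with ⟨⟨w, hw1, hw2⟩, _⟩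
        exact Reach.step (hWR w hw1) hw2
      rcases ih (gFront adj n M (u :: us)).1 (gFront adj n M (u :: us)).2 hWR' with ⟨t, ht, hEq⟩
      refine ⟨(u :: us).length + t, by simp; omega, ?_⟩
      have hG := gLoop_front adj n (u :: us) [] M t
      rw [List.append_nil, List.nil_append] at hG
      rw [hG]
      simpa only [gRounds] using hEq


-- ===== Python index arithmetic (negative = from the end) =====

theorem pyIdx_canV (n v : Int) (hv1 : -n ≤ v) (hv2 : v < n) :
    PySem.List.pyIdx? n.toNat v = some ((canV n v).toNat) := by
  unfold PySem.List.pyIdx? canV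
  by_cases h0 : 0 ≤ v
  · rw [if_pos h0, if_pos (by omega), if_neg (by omega)]
  · rw [if_neg h0, if_pos (by omega), if_pos (by omega)]
    congr 1
    omega

theorem pyGet?_canV {α : Type} (xs : List α) (n v : Int) (h : xs.length = n.toNat)
    (hv1 : -n ≤ v) (hv2 : v < n) :
    PySem.List.pyGet? xs v = xs[(canV n v).toNat]? := by
  have hidx : PySem.List.pyIdx? xs.length v = some ((canV n v).toNat) := by
    rw [h]; exact pyIdx_canV n v hv1 hv2
  simp [PySem.List.pyGet?, hidx]

theorem pySetD_canV {α : Type} (xs : List α) (n v : Int) (a : α) (h : xs.length = n.toNat)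
    (hv1 : -n ≤ v) (hv2 : v < n) :
    PySem.List.pySetD xs v a = xs.set (canV n v).toNat a := by
  have hidx : PySem.List.pyIdx? xs.length v = some ((canV n v).toNat) := by
    rw [h]; exact pyIdx_canV n v hv1 hv2
  simp [PySem.List.pySetD, PySem.List.pySet?, hidx]

-- ===== simulation of port A by the generic exploration =====

theorem distAt_pySetD (dist : List (Option Int)) (n v i : Int) (a : Option Int)
    (hlen : dist.length = n.toNat) (hv : -n ≤ v ∧ v < n) (hi : 0 ≤ i ∧ i < n) :
    distAt (PySem.List.pySetD dist v a) i = if i = canV n v then a else distAt dist i := by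
  have hcb := canV_bounds n v hv.1 hv.2
  unfold distAt
  rw [pySetD_canV dist n v a hlen hv.1 hv.2, PySem.List.pyGet?_of_nonneg _ hi.1,
    PySem.List.pyGet?_of_nonneg _ hi.1, List.getElem?_set]
  by_cases h : i = canV n v
  · subst h
    simp [show (canV n v).toNat < dist.length by omega]
  · have hne : (canV n v).toNat ≠ i.toNat := by omega
    simp [hne, h]

theorem distAt_canV (dist : List (Option Int)) (n v : Int) (hlen : dist.length = n.toNat)
    (hv1 : -n ≤ v) (hv2 : v < n) : distAt dist v = distAt dist (canV n v) := by
  have hcb := canV_bounds n v hv1 hv2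
  unfold distAt
  rw [pyGet?_canV dist n v hlen hv1 hv2, PySem.List.pyGet?_of_nonneg _ hcb.1]

def corrA (n : Int) (dist : List (Option Int)) (M : Int → Bool) : Prop :=
  ∀ i : Int, 0 ≤ i → i < n → (distAt dist i).isSome = M i

theorem aInner_sim (n : Int) (row : List Int) (hrow : ∀ v ∈ row, -n ≤ v ∧ v < n) :
    ∀ (dist : List (Option Int)) (M : Int → Bool) (u : Int),
      dist.length = n.toNat → corrA n dist M →
      (aInner dist u row).1.length = n.toNat ∧ corrA n (aInner dist u row).1 (gInner n M row).1 ∧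
        (aInner dist u row).2 = (gInner n M row).2 := by
  induction row with
  | nil => intro dist M u hlen hc; exact ⟨hlen, hc, rfl⟩
  | cons v vs ih =>
    intro dist M u hlen hc
    have hv := hrow v List.mem_cons_self
    have hcb := canV_bounds n v hv.1 hv.2
    have hdv : distAt dist v = distAt dist (canV n v) := distAt_canV dist n v hlen hv.1 hv.2
    have hbranch : (distAt dist v = none) ↔ (M (canV n v) = false) := by
      have hcv := hc (canV n v) hcb.1 hcb.2
      rw [hdv]
      constructor
      · intro h; rw [← hcv, h]; rfl
      · intro h
        rw [← hcv] at h
        cases hdd : distAt dist (canV n v) with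
        | none => rfl
        | some x => rw [hdd] at h; simp at h
    have hrow' : ∀ w ∈ vs, -n ≤ w ∧ w < n := fun w hw => hrow w (List.mem_cons_of_mem _ hw)
    cases h : M (canV n v) with
    | true =>
      have hne : ¬ (distAt dist v = none) := by
        intro hcon; rw [hbranch] at hcon; simp [h] at hcon
      rw [gInner_cons_true n vs h]
      simp only [aInner, if_neg hne]
      exact ih hrow' dist M u hlen hc
    | false =>
      have heq : distAt dist v = none := hbranch.2 h
      rw [gInner_cons_false n vs h]
      simp only [aInner, heq]
      set dist' := PySem.List.pySetD dist v (some ((distAt dist u).getD 0 + 1)) with hd'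
      have hlen' : dist'.length = n.toNat := by
        rw [hd', PySem.List.length_pySetD]; exact hlen
      have hc' : corrA n dist' (gUpd M (canV n v)) := by
        intro j hj0 hj1
        rw [hd', distAt_pySetD dist n v j _ hlen hv ⟨hj0, hj1⟩]
        by_cases hjv : j = canV n v
        · simp [hjv, gUpd]
        · rw [if_neg hjv]
          simp only [gUpd, if_neg hjv]
          exact hc j hj0 hj1
      rcases ih hrow' dist' (gUpd M (canV n v)) u hlen' hc' with ⟨h1, h2, h3⟩
      exact ⟨h1, h2, by simp [h3]⟩

theorem aLoop_sim (adj : List (List Int)) (s n : Int)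
    (Hrows : ∀ u : Int, Reach adj s u → ∀ v ∈ rowOf adj u, -n ≤ v ∧ v < n) :
    ∀ (fuel : Nat) (dist : List (Option Int)) (M : Int → Bool) (W : List Int),
      dist.length = n.toNat → corrA n dist M →
      (∀ u ∈ W, Reach adj s u) → (∀ u ∈ W, M (canV n u) = true) →
      corrA n (aLoop adj fuel dist W) (gLoop adj n fuel M W) := by
  intro fuel
  induction fuel with
  | zero => intro dist M W hlen hc _ _; simpa [aLoop, gLoop] using hc
  | succ f ih =>
    intro dist M W hlen hc hWR hWm
    cases W with
    | nil => simpa [aLoop, gLoop] using hc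
    | cons u qs =>
      simp only [aLoop, gLoop]
      have hRu : Reach adj s u := hWR u List.mem_cons_self
      rcases aInner_sim n (rowOf adj u) (Hrows u hRu) dist M u hlen hc with ⟨h1, h2, h3⟩
      rw [h3]
      apply ih _ _ _ h1 h2
      · intro x hx
        rcases List.mem_append.1 hx with h | h
        · exact hWR x (List.mem_cons_of_mem _ h)
        · exact Reach.step hRu (gInner_push n _ M x h).1
      · intro x hx
        rcases List.mem_append.1 hx with h | h
        · exact (gInner_mark n _ _ _).2 (Or.inl (hWm x (List.mem_cons_of_mem _ h)))
        · exact (gInner_mark n _ _ _).2 (Or.inr (List.mem_map_of_mem h))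

-- ===== simulation of port B by the generic exploration =====

theorem reachVal_pySetD (r : List Int) (n v i : Int) (a : Int)
    (hlen : r.length = n.toNat) (hv : -n ≤ v ∧ v < n) (hi : 0 ≤ i ∧ i < n) :
    reachVal (PySem.List.pySetD r v a) i = if i = canV n v then a else reachVal r i := by
  have hcb := canV_bounds n v hv.1 hv.2
  unfold reachVal
  rw [pySetD_canV r n v a hlen hv.1 hv.2, PySem.List.pyGet?_of_nonneg _ hi.1,
    PySem.List.pyGet?_of_nonneg _ hi.1, List.getElem?_set]
  by_cases h : i = canV n v
  · subst h
    simp [show (canV n v).toNat < r.length by omega]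
  · have hne : (canV n v).toNat ≠ i.toNat := by omega
    simp [hne, h]

theorem reachVal_canV (r : List Int) (n v : Int) (hlen : r.length = n.toNat)
    (hv1 : -n ≤ v) (hv2 : v < n) : reachVal r v = reachVal r (canV n v) := by
  have hcb := canV_bounds n v hv1 hv2
  unfold reachVal
  rw [pyGet?_canV r n v hlen hv1 hv2, PySem.List.pyGet?_of_nonneg _ hcb.1]

-- the 0/1 mask corresponds to an abstract mark function
def corrB (n : Int) (r : List Int) (M : Int → Bool) : Prop :=
  ∀ i : Int, 0 ≤ i → i < n → reachVal r i = (if M i then 1 else 0)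

theorem bVisit_sim (n : Int) (row : List Int) (hrow : ∀ v ∈ row, -n ≤ v ∧ v < n) :
    ∀ (r : List Int) (M : Int → Bool) (acc : List Int),
      r.length = n.toNat → corrB n r M →
      (bVisit r acc row).1.length = n.toNat ∧ corrB n (bVisit r acc row).1 (gInner n M row).1 ∧
        (bVisit r acc row).2 = acc ++ (gInner n M row).2 := by
  induction row with
  | nil => intro r M acc hlen hc; exact ⟨hlen, hc, by simp [bVisit, gInner]⟩
  | cons v vs ih =>
    intro r M acc hlen hc
    have hv := hrow v List.mem_cons_self
    have hcb := canV_bounds n v hv.1 hv.2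
    have hval : reachVal r v = (if M (canV n v) then 1 else 0) := by
      rw [reachVal_canV r n v hlen hv.1 hv.2]
      exact hc (canV n v) hcb.1 hcb.2
    have hrow' : ∀ w ∈ vs, -n ≤ w ∧ w < n := fun w hw => hrow w (List.mem_cons_of_mem _ hw)
    cases h : M (canV n v) with
    | true =>
      have htest : (reachVal r v == 0) = false := by rw [hval, h]; rfl
      rw [gInner_cons_true n vs h]
      simp only [bVisit, htest, Bool.false_eq_true, if_false]
      exact ih hrow' r M acc hlen hc
    | false =>
      have htest : (reachVal r v == 0) = true := by rw [hval, h]; rfl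
      rw [gInner_cons_false n vs h]
      simp only [bVisit, htest, if_true]
      set r' := PySem.List.pySetD r v 1 with hr'
      have hlen' : r'.length = n.toNat := by
        rw [hr', PySem.List.length_pySetD]; exact hlen
      have hc' : corrB n r' (gUpd M (canV n v)) := by
        intro j hj0 hj1
        rw [hr', reachVal_pySetD r n v j _ hlen hv ⟨hj0, hj1⟩]
        by_cases hjv : j = canV n v
        · simp [hjv, gUpd]
        · rw [if_neg hjv]; simp only [gUpd, if_neg hjv]; exact hc j hj0 hj1
      rcases ih hrow' r' (gUpd M (canV n v)) (acc ++ [v]) hlen' hc' with ⟨h1, h2, h3⟩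
      refine ⟨h1, h2, ?_⟩
      rw [h3]; simp

theorem bFront_sim (adj : List (List Int)) (s n : Int)
    (Hrows : ∀ u : Int, Reach adj s u → ∀ v ∈ rowOf adj u, -n ≤ v ∧ v < n) :
    ∀ (front : List Int) (r : List Int) (M : Int → Bool) (acc : List Int),
      r.length = n.toNat → corrB n r M → (∀ u ∈ front, Reach adj s u) →
      (bFront adj r acc front).1.length = n.toNat ∧
        corrB n (bFront adj r acc front).1 (gFront adj n M front).1 ∧
        (bFront adj r acc front).2 = acc ++ (gFront adj n M front).2 := by
  intro front
  induction front with
  | nil => intro r M acc hlen hc _; exact ⟨hlen, hc, by simp [bFront, gFront]⟩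
  | cons u us ih =>
    intro r M acc hlen hc hR
    have hRu : Reach adj s u := hR u List.mem_cons_self
    simp only [bFront, gFront, bAdjRow_eq]
    rcases bVisit_sim n (rowOf adj u) (Hrows u hRu) r M acc hlen hc with ⟨h1, h2, h3⟩
    rw [h3]
    rcases ih (bVisit r acc (rowOf adj u)).1 (gInner n M (rowOf adj u)).1
        (acc ++ (gInner n M (rowOf adj u)).2) h1 h2
        (fun w hw => hR w (List.mem_cons_of_mem _ hw)) with ⟨g1, g2, g3⟩
    exact ⟨g1, g2, by rw [g3]; simp⟩

theorem bRounds_sim (adj : List (List Int)) (s n : Int)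
    (Hrows : ∀ u : Int, Reach adj s u → ∀ v ∈ rowOf adj u, -n ≤ v ∧ v < n) :
    ∀ (fuel : Nat) (r : List Int) (M : Int → Bool) (W : List Int),
      r.length = n.toNat → corrB n r M → (∀ u ∈ W, Reach adj s u) →
      corrB n (bRounds adj fuel r W) (gRounds adj n fuel M W) ∧
        (bRounds adj fuel r W).length = n.toNat := by
  intro fuel
  induction fuel with
  | zero =>
    intro r M W hlen hc _
    exact ⟨by simpa [bRounds, gRounds] using hc, by simpa [bRounds] using hlen⟩
  | succ f ih =>
    intro r M W hlen hc hWR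
    cases W with
    | nil => exact ⟨by simpa [bRounds, gRounds] using hc, by simpa [bRounds] using hlen⟩
    | cons u us =>
      simp only [bRounds, gRounds]
      rcases bFront_sim adj s n Hrows (u :: us) r M [] hlen hc hWR with ⟨h1, h2, h3⟩
      rw [h3]
      simp only [List.nil_append]
      apply ih _ _ _ h1 h2
      intro x hx
      rcases gFront_push adj n (u :: us) M x hx with ⟨⟨w, hw1, hw2⟩, _⟩
      exact Reach.step (hWR w hw1) hw2

-- ===== VERDICT (by name: the statement is the Claim_ definition above) =====
theorem bfs_spec : Claim_equal_bfs := by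
  intro adj s n _ hpre
  rcases hpre with ⟨hgs, hclosed⟩
  have hgs' := of_decide_eq_true hgs
  have hs1 : -n ≤ s := hgs'.1
  have hs2 : s < n := hgs'.2.1
  have hsc := canV_bounds n s hs1 hs2
  unfold Spec_bfs bfs bfs_alt
  have hReachMem : ∀ u, Reach adj s u → u ∈ reachSet adj s n := by
    intro u hu
    induction hu with
    | refl => exact mem_reachSet_self adj s n
    | step hu hv ihu =>
      exact mem_reachSet_step adj s n _ _ ihu (hclosed _ ihu) (by rw [rowOfP_eq]; exact hv)
  have Hrows : ∀ u : Int, Reach adj s u → ∀ v ∈ rowOf adj u, -n ≤ v ∧ v < n := by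
    intro u hu v hv
    have hvR : Reach adj s v := Reach.step hu hv
    have hg := of_decide_eq_true (hclosed v (hReachMem v hvR))
    exact ⟨hg.1, hg.2.1⟩
  set M0 : Int → Bool := fun x => decide (x = canV n s) with hM0
  -- initial correspondences
  have hlenA : (PySem.List.pySetD (List.replicate n.toNat (none : Option Int)) s (some 0)).length = n.toNat := by
    rw [PySem.List.length_pySetD]; simp
  have hcA : corrA n (PySem.List.pySetD (List.replicate n.toNat (none : Option Int)) s (some 0)) M0 := by
    intro i hi0 hi1
    rw [distAt_pySetD _ n s i _ (by simp) ⟨hs1, hs2⟩ ⟨hi0, hi1⟩]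
    by_cases h : i = canV n s
    · simp [h, hM0]
    · rw [if_neg h]
      unfold distAt
      rw [PySem.List.pyGet?_of_nonneg _ hi0]
      rw [List.getElem?_replicate]
      have : i.toNat < n.toNat := by omega
      simp [this, hM0, h]
  have hlenB : (PySem.List.pySetD (List.replicate n.toNat (0 : Int)) s 1).length = n.toNat := by
    rw [PySem.List.length_pySetD]; simp
  have hcB : corrB n (PySem.List.pySetD (List.replicate n.toNat (0 : Int)) s 1) M0 := by
    intro i hi0 hi1
    rw [reachVal_pySetD _ n s i _ (by simp) ⟨hs1, hs2⟩ ⟨hi0, hi1⟩]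
    by_cases h : i = canV n s
    · simp [h, hM0]
    · rw [if_neg h]
      unfold reachVal
      rw [PySem.List.pyGet?_of_nonneg _ hi0]
      rw [List.getElem?_replicate]
      have : i.toNat < n.toNat := by omega
      simp [this, hM0, h]
  -- both schedules compute the same final marks
  have hWR0 : ∀ u ∈ [s], Reach adj s u := by
    intro u hu
    rcases List.mem_singleton.1 hu with rfl
    exact Reach.refl
  have hWm0 : ∀ u ∈ [s], M0 (canV n u) = true := by
    intro u hu
    rcases List.mem_singleton.1 hu with rfl
    simp [hM0]
  have hfuel0 : ([s] : List Int).length + (unmk M0 n).card ≤ n.toNat + 1 := by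
    have : (unmk M0 n).card ≤ n.toNat := by
      calc (unmk M0 n).card ≤ (Finset.range n.toNat).card := Finset.card_filter_le _ _
        _ = n.toNat := Finset.card_range _
    simp only [List.length_singleton]
    omega
  have hsame : gRounds adj n (n.toNat + 1) M0 [s] = gLoop adj n (n.toNat + 1) M0 [s] := by
    rcases gRounds_as_gLoop adj s n (n.toNat + 1) M0 [s] hWR0 with ⟨t, ht, hEq⟩
    have hd : t = (n.toNat + 1) + (t - (n.toNat + 1)) := by omega
    rw [hEq, hd, gLoop_fuel_ge adj s n Hrows (n.toNat + 1) M0 [s] hWR0 hfuel0]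
  have hA := aLoop_sim adj s n Hrows (n.toNat + 1) _ M0 [s] hlenA hcA hWR0 hWm0
  have hB := bRounds_sim adj s n Hrows (n.toNat + 1) _ M0 [s] hlenB hcB hWR0
  -- pointwise equality of the two output masks
  set A := aLoop adj (n.toNat + 1) (PySem.List.pySetD (List.replicate n.toNat (none : Option Int)) s (some 0)) [s] with hAd
  set L := bRounds adj (n.toNat + 1) (PySem.List.pySetD (List.replicate n.toNat (0 : Int)) s 1) [s] with hLd
  have hBlen : L.length = n.toNat := hB.2
  apply List.ext_getElem
  · simp only [List.length_map, List.length_range]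
    omega
  · intro k hk1 hk2
    have hk' : k < n.toNat := by simpa using hk1
    have h0 : (0 : Int) ≤ (k : Int) := by omega
    have h1 : (k : Int) < n := by omega
    have hkL : k < L.length := by omega
    simp only [List.getElem_map, List.getElem_range]
    have hval : reachVal L (k : Int) = L[k] := by
      unfold reachVal
      rw [PySem.List.pyGet?_of_nonneg _ h0]
      have htn : ((k : Int)).toNat = k := by omega
      rw [htn, List.getElem?_eq_getElem hkL]
      rfl
    have hLk : L[k] = (if gRounds adj n (n.toNat + 1) M0 [s] (k : Int) then (1 : Int) else 0) := by
      rw [← hval]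
      exact hB.1 (k : Int) h0 h1
    have hmain : (distAt A (k : Int)).isSome = gLoop adj n (n.toNat + 1) M0 [s] (k : Int) :=
      hA (k : Int) h0 h1
    rw [hLk, hsame, ← hmain]
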